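-- pv_equiv track=rewrite | github.com/rubelw/OSSS | src/OSSS/ai/agents/query_data/handlers/objectives_handler.py | _select_objectives_fields
-- ===== SOURCE A (Python) =====
-- from typing import Any, Dict, List, Sequence
--
-- def _select_objectives_fields(rows: Sequence[Dict[str, Any]]) -> List[str]:
--     if not rows:
--         return []
--
--     preferred_order = [
--         "id",
--         "objective_code",
--         "title",
--         "description",
--         "category",
--         "owner_id",
--         "owner_name",
--         "status",
--         "start_date",
--         "due_date",
--         "completed_at",
--         "created_at",
--         "updated_at",
--     ]
--
--     all_keys: List[str] = []
--     for r in rows: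
--         for k in r.keys():
--             if k not in all_keys:
--                 all_keys.append(k)
--
--     ordered = [c for c in preferred_order if c in all_keys]
--     ordered.extend(k for k in all_keys if k not in ordered)
--     return ordered
-- ===== SOURCE B (Python) =====
-- from typing import Any, Dict, List, Sequence
--
-- def _select_objectives_fields(rows: Sequence[Dict[str, Any]]) -> List[str]:
--     if not rows:
--         return []
--
--     preferred_order = [
--         "id",
--         "objective_code",
--         "title",
--         "description",
--         "category",
--         "owner_id",
--         "owner_name",
--         "status",
--         "start_date",
--         "due_date",
--         "completed_at",
--         "created_at",
--         "updated_at",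
--     ]
--
--     rank = {k: i for i, k in enumerate(preferred_order)}
--
--     # one pass: first-seen key -> a sort weight past all preferred ranks
--     seen: Dict[str, int] = {}
--     for r in rows:
--         for k in r.keys():
--             if k not in seen:
--                 seen[k] = len(preferred_order) + len(seen)
--
--     return sorted(seen, key=lambda k: rank.get(k, seen[k]))
-- ===== Notes on version B (the rewrite author's own statement) =====
-- stated objective: faster
-- what changed: Replaces A's list-membership scans and two filtering passes with a single pass building a dict of first-seen sort weights, followed by one stable sort under a rank lookup (preferred keys get their preferred index, extras get an index past all ranks).
import Mathlib
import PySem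

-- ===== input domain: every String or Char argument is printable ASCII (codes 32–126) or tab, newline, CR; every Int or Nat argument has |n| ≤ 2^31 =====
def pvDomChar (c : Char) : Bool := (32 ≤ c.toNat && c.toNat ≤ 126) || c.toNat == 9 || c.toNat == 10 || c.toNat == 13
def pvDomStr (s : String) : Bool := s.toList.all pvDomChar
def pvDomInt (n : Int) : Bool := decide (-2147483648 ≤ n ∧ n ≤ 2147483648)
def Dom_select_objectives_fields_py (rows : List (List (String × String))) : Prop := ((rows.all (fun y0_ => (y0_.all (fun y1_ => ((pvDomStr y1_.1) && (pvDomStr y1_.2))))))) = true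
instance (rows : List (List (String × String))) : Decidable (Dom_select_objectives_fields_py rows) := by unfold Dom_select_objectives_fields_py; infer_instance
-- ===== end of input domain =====

-- B replaces A's list-membership scans and two filtering passes with one pass building a
-- dict of first-seen sort weights plus a single stable sort under a rank lookup (objective:
-- faster; a timing run measured B faster; equality of return values is proved below).

-- ===== PORT A =====
def preferredOrderPV : List String :=
  ["id", "objective_code", "title", "description", "category", "owner_id", "owner_name",
   "status", "start_date", "due_date", "completed_at", "created_at", "updated_at"]

def select_objectives_fields_py (rows : List (List (String × String))) : List String :=
  if rows = [] then []
  else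
    -- for r in rows: for k in r.keys(): if k not in all_keys: all_keys.append(k)
    let all_keys : List String :=
      rows.foldl (fun acc r =>
        r.foldl (fun acc2 kv => if kv.1 ∈ acc2 then acc2 else acc2 ++ [kv.1]) acc) []
    -- ordered = [c for c in preferred_order if c in all_keys]
    let ordered := preferredOrderPV.filter (fun c => decide (c ∈ all_keys))
    -- ordered.extend(k for k in all_keys if k not in ordered): the lazy generator tests
    -- membership against the growing list, hence the fold over the accumulator
    all_keys.foldl (fun acc k => if k ∈ acc then acc else acc ++ [k]) ordered

-- ===== PORT B =====
-- rank = {k: i for i, k in enumerate(preferred_order)}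
def rankPV : PySem.Dict String Int :=
  (PySem.List.enumerate preferredOrderPV).foldl (fun d p => d.insert p.2 p.1) PySem.Dict.empty

def select_objectives_fields_py_alt (rows : List (List (String × String))) : List String :=
  if rows = [] then []
  else
    -- for r in rows: for k in r.keys(): if k not in seen: seen[k] = len(preferred_order) + len(seen)
    let seen : PySem.Dict String Int :=
      rows.foldl (fun d r =>
        r.foldl (fun d2 kv =>
          if d2.contains kv.1 then d2
          else d2.insert kv.1 ((preferredOrderPV.length : Int) + (PySem.Dict.size d2))) d)
        PySem.Dict.empty
    -- sorted(seen, key=lambda k: rank.get(k, seen[k]))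
    PySem.List.sorted (PySem.Dict.keys seen)
      (fun k => if rankPV.contains k then rankPV.getD k 0 else seen.getD k 0) false

-- ===== PRECONDITION & SPEC =====
def Spec_select_objectives_fields_py (rows : List (List (String × String))) (out : List String) : Prop := out = select_objectives_fields_py_alt rows
instance (rows : List (List (String × String))) (out : List String) : Decidable (Spec_select_objectives_fields_py rows out) := by unfold Spec_select_objectives_fields_py; infer_instance

-- ===== CLAIM (what is proved, stated in full; the proofs are below) =====
def Claim_equal_select_objectives_fields_py : Prop := ∀ (rows : List (List (String × String))), Dom_select_objectives_fields_py rows → Spec_select_objectives_fields_py rows (select_objectives_fields_py rows)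

-- ===== LEMMAS AND PROOFS =====

def stepA (acc : List String) (k : String) : List String :=
  if k ∈ acc then acc else acc ++ [k]

def stepB (d : PySem.Dict String Int) (k : String) : PySem.Dict String Int :=
  if d.contains k then d
  else d.insert k ((preferredOrderPV.length : Int) + (PySem.Dict.size d))

/-- Joint invariant between A's first-seen key list and B's weight dict. -/
def InvPV (acc : List String) (d : PySem.Dict String Int) : Prop :=
  PySem.Dict.keys d = acc ∧ acc.Nodup ∧
  (∀ k ∈ acc, (preferredOrderPV.length : Int) ≤ d.getD k 0 ∧
      d.getD k 0 < (preferredOrderPV.length : Int) + (acc.length : Int)) ∧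
  acc.Pairwise (fun a b => d.getD a 0 < d.getD b 0)

lemma size_eq_keys_length (d : PySem.Dict String Int) :
    PySem.Dict.size d = (PySem.Dict.keys d).length := by
  simp [PySem.Dict.size, PySem.Dict.keys]

lemma inv_step (acc : List String) (d : PySem.Dict String Int) (k : String)
    (h : InvPV acc d) : InvPV (stepA acc k) (stepB d k) := by
  obtain ⟨hkeys, hnd, hbds, hpw⟩ := h
  have hc : d.contains k = decide (k ∈ acc) := by
    rw [PySem.Dict.contains_eq_decide_mem_keys, hkeys]
  by_cases hk : k ∈ acc
  · have hA : stepA acc k = acc := by simp [stepA, hk]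
    have hB : stepB d k = d := by simp [stepB, hc, hk]
    rw [hA, hB]
    exact ⟨hkeys, hnd, hbds, hpw⟩
  · have hcf : d.contains k = false := by simp [hc, hk]
    have hsz : (PySem.Dict.size d : Int) = (acc.length : Int) := by
      rw [size_eq_keys_length, hkeys]
    have hA : stepA acc k = acc ++ [k] := by simp [stepA, hk]
    have hB : stepB d k = d.insert k ((preferredOrderPV.length : Int) + (PySem.Dict.size d)) := by
      simp [stepB, hcf]
    have hgd : ∀ k', (stepB d k).getD k' 0 =
        if k' = k then (preferredOrderPV.length : Int) + (acc.length : Int) else d.getD k' 0 := by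
      intro k'
      rw [hB, PySem.Dict.getD_insert, hsz]
    refine ⟨?_, ?_, ?_, ?_⟩
    · rw [hA, hB, PySem.Dict.keys_insert_of_not_contains _ _ hcf, hkeys]
    · rw [hA]
      rw [List.nodup_append]
      exact ⟨hnd, List.nodup_singleton k, by
        intro a ha b hb
        rw [List.mem_singleton] at hb
        exact hb ▸ fun e => hk (e ▸ ha)⟩
    · intro k' hk'
      rw [hA] at hk' ⊢
      rw [List.mem_append, List.mem_singleton] at hk'
      have hlen : ((acc ++ [k]).length : Int) = (acc.length : Int) + 1 := by
        simp
      rw [hlen, hgd k']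
      rcases hk' with hk' | hk'
      · have hne : k' ≠ k := fun e => hk (e ▸ hk')
        rw [if_neg hne]
        have := hbds k' hk'
        omega
      · subst hk'
        rw [if_pos rfl]
        have : (0:Int) ≤ (acc.length : Int) := by positivity
        omega
    · rw [hA, List.pairwise_append]
      refine ⟨?_, by simp, ?_⟩
      · refine hpw.imp_of_mem ?_
        intro a b ha hb hab
        have hna : a ≠ k := fun e => hk (e ▸ ha)
        have hnb : b ≠ k := fun e => hk (e ▸ hb)
        rw [hgd a, hgd b, if_neg hna, if_neg hnb]
        exact hab
      · intro a ha b hb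
        rw [List.mem_singleton] at hb
        have hna : a ≠ k := fun e => hk (e ▸ ha)
        rw [hb, hgd a, hgd k, if_neg hna, if_pos rfl]
        have := (hbds a ha).2
        omega

lemma inv_foldl (ks : List String) (acc : List String) (d : PySem.Dict String Int)
    (h : InvPV acc d) : InvPV (ks.foldl stepA acc) (ks.foldl stepB d) := by
  induction ks generalizing acc d with
  | nil => exact h
  | cons k ks ih => exact ih _ _ (inv_step acc d k h)

lemma inv_rows (rows : List (List (String × String))) (acc : List String)
    (d : PySem.Dict String Int) (h : InvPV acc d) :
    InvPV (rows.foldl (fun a r => r.foldl (fun a2 kv => stepA a2 kv.1) a) acc)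
          (rows.foldl (fun e r => r.foldl (fun e2 kv => stepB e2 kv.1) e) d) := by
  induction rows generalizing acc d with
  | nil => exact h
  | cons r rows ih =>
    rw [List.foldl_cons, List.foldl_cons]
    refine ih _ _ ?_
    have h1 : r.foldl (fun a2 kv => stepA a2 kv.1) acc = (r.map (·.1)).foldl stepA acc := by
      rw [List.foldl_map]
    have h2 : r.foldl (fun e2 kv => stepB e2 kv.1) d = (r.map (·.1)).foldl stepB d := by
      rw [List.foldl_map]
    rw [h1, h2]
    exact inv_foldl _ _ _ h

lemma inv_empty : InvPV [] PySem.Dict.empty := by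
  refine ⟨?_, by simp, by simp, by simp⟩
  simp [PySem.Dict.keys, PySem.Dict.empty]

/-- A's extend-with-membership fold, on a nodup source, is append-filter. -/
lemma ext_foldl (xs : List String) (p : List String) (h : xs.Nodup) :
    xs.foldl stepA p = p ++ xs.filter (fun k => decide (k ∉ p)) := by
  induction xs generalizing p with
  | nil => simp
  | cons x xs ih =>
    have hx : x ∉ xs := (List.nodup_cons.mp h).1
    have hnd : xs.Nodup := (List.nodup_cons.mp h).2
    by_cases hp : x ∈ p
    · simp only [List.foldl_cons, stepA, if_pos hp]
      rw [ih p hnd, List.filter_cons]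
      simp [hp]
    · simp only [List.foldl_cons, stepA, if_neg hp]
      rw [ih (p ++ [x]) hnd, List.filter_cons]
      have hcong : xs.filter (fun k => decide (k ∉ p ++ [x])) =
          xs.filter (fun k => decide (k ∉ p)) := by
        apply List.filter_congr
        intro k hkmem
        have : k ≠ x := fun e => hx (e ▸ hkmem)
        simp [this]
      rw [hcong]
      simp [hp]

lemma rank_keys : rankPV.keys = preferredOrderPV := by decide
lemma rank_lt : ∀ a ∈ preferredOrderPV, rankPV.getD a 0 < (preferredOrderPV.length : Int) := by
  decide
lemma rank_pairwise :
    preferredOrderPV.Pairwise (fun a b => rankPV.getD a 0 < rankPV.getD b 0) := by decide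
lemma pref_nodup : preferredOrderPV.Nodup := by decide

lemma rank_contains (k : String) : rankPV.contains k = decide (k ∈ preferredOrderPV) := by
  rw [PySem.Dict.contains_eq_decide_mem_keys, rank_keys]

-- ===== VERDICT (by name: the statement is the Claim_ definition above) =====
theorem select_objectives_fields_py_spec : Claim_equal_select_objectives_fields_py := by
  intro rows _
  unfold Spec_select_objectives_fields_py select_objectives_fields_py
    select_objectives_fields_py_alt
  by_cases hr : rows = []
  · simp [hr]
  · simp only [if_neg hr]
    set all_keys : List String :=
      rows.foldl (fun acc r =>
        r.foldl (fun acc2 kv => if kv.1 ∈ acc2 then acc2 else acc2 ++ [kv.1]) acc) []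
      with hak
    set seen : PySem.Dict String Int :=
      rows.foldl (fun d r =>
        r.foldl (fun d2 kv =>
          if d2.contains kv.1 then d2
          else d2.insert kv.1 ((preferredOrderPV.length : Int) + (PySem.Dict.size d2))) d)
        PySem.Dict.empty
      with hseen
    have hinv : InvPV all_keys seen := by
      rw [hak, hseen]
      exact inv_rows rows [] PySem.Dict.empty inv_empty
    obtain ⟨hkeys, hnd, hbds, hpw⟩ := hinv
    set key : String → Int :=
      fun k => if rankPV.contains k then rankPV.getD k 0 else seen.getD k 0 with hkey
    set ordered := preferredOrderPV.filter (fun c => decide (c ∈ all_keys)) with hord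
    -- facts about membership in `ordered`
    have hmem_ord : ∀ k, k ∈ ordered ↔ k ∈ preferredOrderPV ∧ k ∈ all_keys := by
      intro k; simp [hord]
    -- A's value in closed form
    have hA : all_keys.foldl (fun acc k => if k ∈ acc then acc else acc ++ [k]) ordered =
        ordered ++ all_keys.filter (fun k => decide (k ∉ ordered)) := by
      have := ext_foldl all_keys ordered hnd
      simpa [stepA] using this
    rw [hA]
    -- rewrite the extras filter to a preferred-membership filter
    have hfc : all_keys.filter (fun k => decide (k ∉ ordered)) =
        all_keys.filter (fun k => !decide (k ∈ preferredOrderPV)) := by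
      apply List.filter_congr
      intro k hkmem
      simp [hmem_ord k, hkmem]
    set extras := all_keys.filter (fun k => decide (k ∉ ordered)) with hex
    -- permutation with seen.keys = all_keys
    have hperm : (ordered ++ extras).Perm seen.keys := by
      rw [hkeys, hfc]
      have h1 : ordered.Perm (all_keys.filter (fun k => decide (k ∈ preferredOrderPV))) := by
        rw [List.perm_ext_iff_of_nodup (hord ▸ pref_nodup.filter _) (hnd.filter _)]
        intro a
        simp only [List.mem_filter, decide_eq_true_eq]
        rw [hmem_ord a]
        tauto
      exact (h1.append_right _).trans (List.filter_append_perm _ _)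
    -- strict pairwise ordering under the sort key
    have hpair : (ordered ++ extras).Pairwise (fun a b => key a < key b) := by
      rw [List.pairwise_append]
      refine ⟨?_, ?_, ?_⟩
      · refine (rank_pairwise.filter _).imp_of_mem ?_
        intro a b ha hb hab
        have ha2 : a ∈ ordered := by rw [hord]; exact ha
        have hb2 : b ∈ ordered := by rw [hord]; exact hb
        have hpa : a ∈ preferredOrderPV := ((hmem_ord a).mp ha2).1
        have hpb : b ∈ preferredOrderPV := ((hmem_ord b).mp hb2).1
        simp only [hkey]
        rw [rank_contains, rank_contains]
        simpa [hpa, hpb] using hab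
      · refine (hpw.filter _).imp_of_mem ?_
        intro a b ha hb hab
        have ha2 : a ∈ extras := by rw [hex]; exact ha
        have hb2 : b ∈ extras := by rw [hex]; exact hb
        have hna : a ∉ preferredOrderPV := by
          have := List.mem_filter.mp (hfc ▸ ha2)
          simpa using this.2
        have hnb : b ∉ preferredOrderPV := by
          have := List.mem_filter.mp (hfc ▸ hb2)
          simpa using this.2
        simp only [hkey]
        rw [rank_contains, rank_contains]
        simpa [hna, hnb] using hab
      · intro a ha b hb
        have hpa : a ∈ preferredOrderPV := ((hmem_ord a).mp ha).1
        have hb2 : b ∈ extras := hb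
        have hmb := List.mem_filter.mp (hfc ▸ hb2)
        have hb1 : b ∈ all_keys := hmb.1
        have hnb : b ∉ preferredOrderPV := by simpa using hmb.2
        simp only [hkey]
        rw [rank_contains, rank_contains]
        have h3 := rank_lt a hpa
        have h4 := (hbds b hb1).1
        simp only [hpa, hnb, decide_true, decide_false, if_true]
        simp only [Bool.false_eq_true, if_false]
        omega
    exact (PySem.List.sorted_eq_of_perm_of_pairwise_lt _ _ key hperm hpair).symm
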